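-- pv_equiv track=rewrite | github.com/bbvandermark/TN3175OscillatorSimulator | matrix_utils.py | block_encode
-- ===== SOURCE A (Python) =====
-- def block_encode(matrix):
--     length = len(matrix)
--     result = [[0 for _ in range(length * 2)] for _ in range(length * 2)]
--     for i in range(length):
--         for j in range(length):
--             result[i][j+length] = matrix[i][j]
--             result[i+length][j] = matrix[j][i]
--     return result
-- ===== SOURCE B (Python) =====
-- def block_encode(matrix):
--     n = len(matrix)
--     def cell(r, c):
--         if r < n <= c:
--             return matrix[r][c - n]
--         if c < n <= r:
--             return matrix[c][r - n]
--         return 0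
--     return [[cell(r, c) for c in range(2 * n)] for r in range(2 * n)]
-- ===== Notes on version B (the rewrite author's own statement) =====
-- stated objective: alternative
-- what changed: B computes every output cell (r,c) of the 2n x 2n grid directly by one closed-form index formula (matrix[r][c-n] in the upper-right quadrant, matrix[c][r-n] in the lower-left, else 0), instead of A's preallocated zero matrix mutated by dual element writes in a nested loop over the input indices.
import Mathlib
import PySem

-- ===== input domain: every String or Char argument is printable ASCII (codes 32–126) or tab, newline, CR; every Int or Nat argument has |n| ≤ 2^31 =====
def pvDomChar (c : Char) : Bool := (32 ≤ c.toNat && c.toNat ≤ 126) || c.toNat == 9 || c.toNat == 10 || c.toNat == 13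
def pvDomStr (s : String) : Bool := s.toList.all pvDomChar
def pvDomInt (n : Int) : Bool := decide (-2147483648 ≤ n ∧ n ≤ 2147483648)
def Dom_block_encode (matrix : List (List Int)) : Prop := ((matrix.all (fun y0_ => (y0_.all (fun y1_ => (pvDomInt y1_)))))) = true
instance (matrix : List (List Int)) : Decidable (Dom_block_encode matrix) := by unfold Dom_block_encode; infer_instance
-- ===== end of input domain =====

-- B computes each output cell (r,c) of the 2n×2n grid by one closed-form index formula
-- instead of A's preallocated zero matrix mutated by dual element writes: alternative decomposition.

-- ===== PORT A =====
-- matrix[i][j] is read via getD; inside Pre_block_encode every such access is in range,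
-- so this is exact on the admitted inputs (outside Pre_ the Python raises IndexError).
def pvM (matrix : List (List Int)) (i j : Nat) : Int := (matrix.getD i []).getD j 0

-- the body of the inner 'for j' loop: the two sequential element assignments
def pvInner (matrix : List (List Int)) (i : Nat) (result : List (List Int)) (j : Nat) :
    List (List Int) :=
  let r1 := result.set i ((result.getD i []).set (j + matrix.length) (pvM matrix i j))
  r1.set (i + matrix.length) ((r1.getD (i + matrix.length) []).set j (pvM matrix j i))

-- the body of the outer 'for i' loop
def pvOuter (matrix : List (List Int)) (result : List (List Int)) (i : Nat) :
    List (List Int) :=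
  (List.range matrix.length).foldl (pvInner matrix i) result

def block_encode (matrix : List (List Int)) : List (List Int) :=
  let length := matrix.length
  let result := List.replicate (length * 2) (List.replicate (length * 2) (0 : Int))
  (List.range length).foldl (pvOuter matrix) result

-- ===== PORT B =====
-- matrix[r][c-n] / matrix[c][r-n] are read via getD; inside Pre_block_encode every such
-- access is in range (outside Pre_ the Python raises IndexError).
def pvCell (matrix : List (List Int)) (n r c : Nat) : Int :=
  if r < n ∧ n ≤ c then (matrix.getD r []).getD (c - n) 0
  else if c < n ∧ n ≤ r then (matrix.getD c []).getD (r - n) 0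
  else 0

def block_encode_alt (matrix : List (List Int)) : List (List Int) :=
  let n := matrix.length
  (List.range (2 * n)).map (fun r => (List.range (2 * n)).map (fun c => pvCell matrix n r c))

-- ===== PRECONDITION & SPEC =====
-- Pre_ admits exactly the inputs on which the Python A returns: every row must have at
-- least len(matrix) entries, otherwise A (and B) raise IndexError.
def Pre_block_encode (matrix : List (List Int)) : Prop :=
  ∀ row ∈ matrix, matrix.length ≤ row.length
instance (matrix : List (List Int)) : Decidable (Pre_block_encode matrix) := by
  unfold Pre_block_encode; infer_instance

def pvWitness_block_encode : List (List Int) := [[1, 2], [3, 4]]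

def Spec_block_encode (matrix : List (List Int)) (out : List (List Int)) : Prop := out = block_encode_alt matrix
instance (matrix : List (List Int)) (out : List (List Int)) : Decidable (Spec_block_encode matrix out) := by unfold Spec_block_encode; infer_instance

-- ===== CLAIM (what is proved, stated in full; the proofs are below) =====
def Claim_equal_block_encode : Prop := ∀ (matrix : List (List Int)), Dom_block_encode matrix → Pre_block_encode matrix → Spec_block_encode matrix (block_encode matrix)

-- ===== LEMMAS AND PROOFS =====

-- canonical rows of the result
def pvTopRow (matrix : List (List Int)) (i : Nat) : List Int :=
  List.replicate matrix.length 0 ++ (List.range matrix.length).map (pvM matrix i)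

def pvBotRow (matrix : List (List Int)) (i : Nat) : List Int :=
  (List.range matrix.length).map (fun j => pvM matrix j i) ++ List.replicate matrix.length 0

-- partial inner-loop effects on a single row
def pvSetTop (matrix : List (List Int)) (i m : Nat) (r : List Int) : List Int :=
  (List.range m).foldl (fun r j => r.set (j + matrix.length) (pvM matrix i j)) r

def pvSetBot (matrix : List (List Int)) (i m : Nat) (s : List Int) : List Int :=
  (List.range m).foldl (fun s j => s.set j (pvM matrix j i)) s

lemma pvSetTop_succ (matrix : List (List Int)) (i m : Nat) (r : List Int) :
    pvSetTop matrix i (m + 1) r =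
      (pvSetTop matrix i m r).set (m + matrix.length) (pvM matrix i m) := by
  simp [pvSetTop, List.range_succ]

lemma pvSetBot_succ (matrix : List (List Int)) (i m : Nat) (s : List Int) :
    pvSetBot matrix i (m + 1) s = (pvSetBot matrix i m s).set m (pvM matrix m i) := by
  simp [pvSetBot, List.range_succ]

-- setting / reading the element right after a prefix P, inside a replicate block
lemma pv_set_at {A : Type} (P : List A) (m : Nat) (Z v : A) (S : List A) (j : Nat)
    (hj : P.length = j) (hm : 0 < m) :
    (P ++ (List.replicate m Z ++ S)).set j v =
      P ++ (v :: (List.replicate (m - 1) Z ++ S)) := by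
  obtain ⟨k, rfl⟩ : ∃ k, m = k + 1 := ⟨m - 1, by omega⟩
  subst hj
  rw [List.set_append_right _ _ (le_refl P.length), Nat.sub_self, List.replicate_succ]
  simp

lemma pv_getD_at {A : Type} (P : List A) (m : Nat) (Z : A) (S : List A) (d : A) (j : Nat)
    (hj : P.length = j) (hm : 0 < m) :
    (P ++ (List.replicate m Z ++ S)).getD j d = Z := by
  obtain ⟨k, rfl⟩ : ∃ k, m = k + 1 := ⟨m - 1, by omega⟩
  subst hj
  rw [List.getD_eq_getElem?_getD, List.getElem?_append_right (le_refl P.length),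
    Nat.sub_self, List.replicate_succ]
  simp

lemma inner_spec (matrix : List (List Int)) (i m : Nat) (res : List (List Int))
    (hi : i < matrix.length) (hlen : res.length = 2 * matrix.length) :
    (List.range m).foldl (pvInner matrix i) res =
      (res.set i (pvSetTop matrix i m (res.getD i []))).set (i + matrix.length)
        (pvSetBot matrix i m (res.getD (i + matrix.length) [])) := by
  induction m with
  | zero =>
    have h1 : i < res.length := by omega
    have h2 : i + matrix.length < res.length := by omega
    simp only [List.range_zero, List.foldl_nil, pvSetTop, pvSetBot,
      List.getD_eq_getElem res [] h1, List.set_getElem_self h1]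
    rw [List.getD_eq_getElem res [] h2, List.set_getElem_self h2]
  | succ m ih =>
    rw [List.range_succ, List.foldl_append, ih]
    simp only [List.foldl_cons, List.foldl_nil]
    rw [pvSetTop_succ, pvSetBot_succ]
    set T := pvSetTop matrix i m (res.getD i []) with hT
    set S := pvSetBot matrix i m (res.getD (i + matrix.length) []) with hS
    have hne : i + matrix.length ≠ i := by omega
    have hlt1 : i < res.length := by omega
    have e1 : ((res.set i T).set (i + matrix.length) S).getD i [] = T := by
      rw [List.getD_eq_getElem?_getD, List.getElem?_set_ne hne,
        List.getElem?_set_self hlt1]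
      rfl
    simp only [pvInner]
    rw [e1]
    set c := T.set (m + matrix.length) (pvM matrix i m) with hc
    have hlt2 : i + matrix.length < (res.set i T).length := by simp [hlen]; omega
    have e3 : (((res.set i T).set (i + matrix.length) S).set i c).getD
        (i + matrix.length) [] = S := by
      rw [List.getD_eq_getElem?_getD, List.getElem?_set_ne hne.symm,
        List.getElem?_set_self hlt2]
      rfl
    rw [e3, List.set_comm S c hne, List.set_set, List.set_set]

lemma setTop_replicate (matrix : List (List Int)) (i m : Nat) (hm : m ≤ matrix.length) :
    pvSetTop matrix i m (List.replicate (2 * matrix.length) 0) =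
      List.replicate matrix.length 0 ++ ((List.range m).map (pvM matrix i) ++
        List.replicate (matrix.length - m) 0) := by
  induction m with
  | zero =>
    have h2 : 2 * matrix.length = matrix.length + matrix.length := by omega
    rw [h2, List.replicate_add]
    simp [pvSetTop]
  | succ m ih =>
    rw [pvSetTop_succ, ih (by omega)]
    rw [show List.replicate matrix.length (0 : Int) ++
          ((List.range m).map (pvM matrix i) ++ List.replicate (matrix.length - m) 0) =
        (List.replicate matrix.length (0 : Int) ++ (List.range m).map (pvM matrix i)) ++
          (List.replicate (matrix.length - m) 0 ++ []) from by simp]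
    rw [pv_set_at _ (matrix.length - m) 0 (pvM matrix i m) [] (m + matrix.length)
      (by simp; omega) (by omega)]
    rw [show matrix.length - m - 1 = matrix.length - (m + 1) from by omega]
    simp [List.range_succ]

lemma setBot_replicate (matrix : List (List Int)) (i m : Nat) (hm : m ≤ matrix.length) :
    pvSetBot matrix i m (List.replicate (2 * matrix.length) 0) =
      (List.range m).map (fun j => pvM matrix j i) ++
        List.replicate (2 * matrix.length - m) 0 := by
  induction m with
  | zero => simp [pvSetBot]
  | succ m ih =>
    rw [pvSetBot_succ, ih (by omega)]
    rw [show (List.range m).map (fun j => pvM matrix j i) ++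
          List.replicate (2 * matrix.length - m) (0 : Int) =
        (List.range m).map (fun j => pvM matrix j i) ++
          (List.replicate (2 * matrix.length - m) (0 : Int) ++ []) from by simp]
    rw [pv_set_at _ (2 * matrix.length - m) 0 (pvM matrix m i) [] m
      (by simp) (by omega)]
    rw [show 2 * matrix.length - m - 1 = 2 * matrix.length - (m + 1) from by omega]
    simp [List.range_succ]

lemma outer_spec (matrix : List (List Int)) (k : Nat) (hk : k ≤ matrix.length) :
    (List.range k).foldl (pvOuter matrix)
        (List.replicate (matrix.length * 2) (List.replicate (matrix.length * 2) 0)) =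
      (List.range k).map (pvTopRow matrix) ++
        (List.replicate (matrix.length - k) (List.replicate (2 * matrix.length) 0) ++
      ((List.range k).map (pvBotRow matrix) ++
        List.replicate (matrix.length - k) (List.replicate (2 * matrix.length) 0))) := by
  induction k with
  | zero =>
    simp only [List.range_zero, List.foldl_nil, List.map_nil, Nat.sub_zero,
      List.nil_append]
    rw [show matrix.length * 2 = 2 * matrix.length from by omega,
      show 2 * matrix.length = matrix.length + matrix.length from by omega,
      List.replicate_add]
  | succ k ih =>
    rw [List.range_succ, List.foldl_append, ih (by omega)]
    simp only [List.foldl_cons, List.foldl_nil]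
    have hkn : k < matrix.length := by omega
    set n := matrix.length with hn
    set Z : List Int := List.replicate (2 * n) 0 with hZ
    set A := (List.range k).map (pvTopRow matrix) with hA
    set C := (List.range k).map (pvBotRow matrix) with hC
    set Rk := A ++ (List.replicate (n - k) Z ++ (C ++ List.replicate (n - k) Z)) with hRk
    have hlenR : Rk.length = 2 * n := by simp [hRk, hA, hC, hZ]; omega
    show pvOuter matrix Rk k = _
    unfold pvOuter
    rw [inner_spec matrix k n Rk hkn hlenR]
    have g1 : Rk.getD k [] = Z :=
      pv_getD_at A (n - k) Z (C ++ List.replicate (n - k) Z) [] k (by simp [hA]) (by omega)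
    have g2 : Rk.getD (k + n) [] = Z := by
      rw [show Rk = (A ++ (List.replicate (n - k) Z ++ C)) ++
            (List.replicate (n - k) Z ++ []) from by simp [hRk]]
      exact pv_getD_at _ (n - k) Z [] [] (k + n) (by simp [hA, hC, hZ]; omega) (by omega)
    have t1 : pvSetTop matrix k n Z = pvTopRow matrix k := by
      rw [hZ, hn, setTop_replicate matrix k matrix.length (le_refl _)]
      simp [pvTopRow]
    have b1 : pvSetBot matrix k n Z = pvBotRow matrix k := by
      rw [hZ, hn, setBot_replicate matrix k matrix.length (le_refl _)]
      rw [show 2 * matrix.length - matrix.length = matrix.length from by omega]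
      rfl
    rw [g1, g2, t1, b1]
    have s1 : Rk.set k (pvTopRow matrix k) =
        A ++ (pvTopRow matrix k :: (List.replicate (n - k - 1) Z ++
          (C ++ List.replicate (n - k) Z))) := by
      rw [hRk]
      exact pv_set_at A (n - k) Z (pvTopRow matrix k) _ k (by simp [hA]) (by omega)
    rw [s1]
    have s2 : (A ++ (pvTopRow matrix k :: (List.replicate (n - k - 1) Z ++
          (C ++ List.replicate (n - k) Z)))).set (k + n) (pvBotRow matrix k) =
        (A ++ (pvTopRow matrix k :: (List.replicate (n - k - 1) Z ++ C))) ++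
          (pvBotRow matrix k :: (List.replicate (n - k - 1) Z ++ [])) := by
      rw [show A ++ (pvTopRow matrix k :: (List.replicate (n - k - 1) Z ++
            (C ++ List.replicate (n - k) Z))) =
          (A ++ (pvTopRow matrix k :: (List.replicate (n - k - 1) Z ++ C))) ++
            (List.replicate (n - k) Z ++ []) from by simp]
      exact pv_set_at _ (n - k) Z (pvBotRow matrix k) [] (k + n)
        (by simp [hA, hC, hZ]; omega) (by omega)
    rw [s2]
    rw [show n - (k + 1) = n - k - 1 from by omega]
    simp [hA, hC, List.append_assoc]

lemma blockA_normal (matrix : List (List Int)) :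
    block_encode matrix =
      (List.range matrix.length).map (pvTopRow matrix) ++
      (List.range matrix.length).map (pvBotRow matrix) := by
  show (List.range matrix.length).foldl (pvOuter matrix) _ = _
  rw [outer_spec matrix matrix.length (le_refl _)]
  simp

lemma blockB_normal (matrix : List (List Int)) :
    block_encode_alt matrix =
      (List.range matrix.length).map (pvTopRow matrix) ++
      (List.range matrix.length).map (pvBotRow matrix) := by
  simp only [block_encode_alt]
  set n := matrix.length with hn
  rw [show 2 * n = n + n from by omega, List.range_add, List.map_append, List.map_map]
  congr 1
  · -- top rows: r < n
    apply List.map_congr_left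
    intro r hr
    rw [List.mem_range] at hr
    unfold pvTopRow
    rw [List.map_append, List.map_map, ← hn]
    congr 1
    · -- left half of a top row: zeros
      rw [List.eq_replicate_iff]
      refine ⟨by simp, ?_⟩
      intro b hb
      rw [List.mem_map] at hb
      obtain ⟨c, hc, rfl⟩ := hb
      rw [List.mem_range] at hc
      simp only [pvCell]
      rw [if_neg (by omega), if_neg (by omega)]
    · -- right half of a top row: matrix[r]
      apply List.map_congr_left
      intro j hj
      rw [List.mem_range] at hj
      simp only [Function.comp, pvCell, pvM]
      rw [if_pos ⟨hr, by omega⟩, Nat.add_sub_cancel_left]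
  · -- bottom rows: r = n + i
    apply List.map_congr_left
    intro i hi
    rw [List.mem_range] at hi
    unfold pvBotRow
    simp only [Function.comp]
    rw [List.map_append, List.map_map, ← hn]
    congr 1
    · -- left half of a bottom row: the i-th column of matrix
      apply List.map_congr_left
      intro j hj
      rw [List.mem_range] at hj
      simp only [pvCell, pvM]
      rw [if_neg (by omega), if_pos ⟨hj, by omega⟩, Nat.add_sub_cancel_left]
    · -- right half of a bottom row: zeros
      rw [List.eq_replicate_iff]
      refine ⟨by simp, ?_⟩
      intro b hb
      rw [List.mem_map] at hb
      obtain ⟨c, hc, rfl⟩ := hb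
      simp only [Function.comp, pvCell]
      rw [if_neg (by omega), if_neg (by omega)]

-- ===== VERDICT (by name: the statement is the Claim_ definition above) =====
theorem block_encode_spec : Claim_equal_block_encode := by
  intro matrix _ _
  unfold Spec_block_encode
  rw [blockA_normal, blockB_normal]
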